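-- pv_equiv track=rewrite | github.com/fifthfir/cs61a-22fall | exam/mt1/fa20/1.py | count_nine
-- ===== SOURCE A (Python) =====
-- def count_nine(element, box):
--     """Count how many times digit element appears in the non-negative integer
--     box in a place that is not next to a 9.
--     >>> count_nine(2, 222122)
--     5
--     >>> count_nine(1, 1911191) # Only the middle 1 is not next to a 9
--     1
--     >>> count_nine(9, 9)
--     1
--     >>> count_nine(9, 99)
--     0
--     >>> count_nine(3, 314159265359)
--     2
--     >>> count_nine(5, 314159265359)
--     1
--     >>> count_nine(9, 314159265359)
--     2
--     >>> count_nine(0, 0) # No digits are in 0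
--     0
--     """
--     assert element >= 0 and element < 10
--     assert box >= 0
--
--     nine, total = False, 0
--     while box > 0:
--         if box % 10 == element and not (nine or box % 100 // 10 == 9):
--             total = total + 1
--         nine = box % 10 == 9
--         box = box // 10
--     return total
-- ===== SOURCE B (Python) =====
-- def count_nine(element, box):
--     assert element >= 0 and element < 10
--     assert box >= 0
--     digits = []
--     while box > 0:
--         digits.append(box % 10)
--         box = box // 10
--     n = len(digits)
--     total = 0
--     for i in range(n):
--         if digits[i] == element and (i == 0 or digits[i - 1] != 9) and (i + 1 == n or digits[i + 1] != 9):
--             total = total + 1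
--     return total
-- ===== Notes on version B (the rewrite author's own statement) =====
-- stated objective: alternative
-- what changed: B materializes the digit list (LSB-first) and counts positions by index with symmetric neighbor checks, replacing A's single streaming pass that carries a previous-digit-was-9 flag and peeks ahead with box % 100 // 10.
import Mathlib
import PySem

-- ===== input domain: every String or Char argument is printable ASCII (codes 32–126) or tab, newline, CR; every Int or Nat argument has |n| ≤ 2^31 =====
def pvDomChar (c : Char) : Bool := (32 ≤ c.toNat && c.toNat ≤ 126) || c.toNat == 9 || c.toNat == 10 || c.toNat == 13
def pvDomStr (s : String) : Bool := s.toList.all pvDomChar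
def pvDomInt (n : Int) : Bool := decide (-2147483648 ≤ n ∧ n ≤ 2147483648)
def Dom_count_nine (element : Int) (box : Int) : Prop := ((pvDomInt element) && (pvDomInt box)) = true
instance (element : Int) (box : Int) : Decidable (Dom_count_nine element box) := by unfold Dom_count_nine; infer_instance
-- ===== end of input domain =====

-- B replaces A's streaming pass (previous-digit flag + box % 100 // 10 look-ahead) by materializing
-- the digit list and counting positions by index with symmetric neighbour checks; same cost (alternative).

-- ===== PORT A =====
-- the while loop of A: state (nine, total), one step per digit; the Nat fuel only makes the
-- recursion structural (count_nine supplies bitLength box + 1 ≥ the digit count, so it never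
-- runs out while box > 0)
def count_nine_loop (element : Int) : Nat → Int → Bool → Int → Int
  | 0, _, _, total => total
  | k + 1, box, nine, total =>
    if box > 0 then
      count_nine_loop element k (PySem.Int.floordiv box 10)
        (decide (PySem.Int.mod box 10 = 9))
        (if PySem.Int.mod box 10 = element ∧
            ¬(nine = true ∨ PySem.Int.floordiv (PySem.Int.mod box 100) 10 = 9)
         then total + 1 else total)
    else total

def count_nine (element : Int) (box : Int) : Int :=
  count_nine_loop element (PySem.Int.bitLength box + 1) box false 0

-- ===== PORT B =====
-- B's first while loop: digits of box, least significant first (empty for box = 0);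
-- same structural-fuel device, fuel bitLength box + 1 never runs out while box > 0
def altDigitsFuel : Nat → Int → List Int
  | 0, _ => []
  | k + 1, box =>
    if box > 0 then
      PySem.Int.mod box 10 :: altDigitsFuel k (PySem.Int.floordiv box 10)
    else []

def altDigits (box : Int) : List Int := altDigitsFuel (PySem.Int.bitLength box + 1) box

-- B's index loop over range(n); digits[i±1] accessed via getD (indices are always in range)
def count_nine_alt (element : Int) (box : Int) : Int :=
  let digits := altDigits box
  let n := digits.length
  (List.range n).foldl (fun total i =>
    if digits.getD i 0 = element ∧ (i = 0 ∨ digits.getD (i - 1) 0 ≠ 9) ∧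
       (i + 1 = n ∨ digits.getD (i + 1) 0 ≠ 9)
    then total + 1 else total) 0

-- ===== PRECONDITION & SPEC =====
-- both programs assert 0 <= element < 10 and 0 <= box (AssertionError otherwise)
def Pre_count_nine (element : Int) (box : Int) : Prop :=
  0 ≤ element ∧ element < 10 ∧ 0 ≤ box
instance (element : Int) (box : Int) : Decidable (Pre_count_nine element box) := by
  unfold Pre_count_nine; infer_instance

def pvWitness_count_nine : Int × Int := (2, 222122)

def Spec_count_nine (element : Int) (box : Int) (out : Int) : Prop := out = count_nine_alt element box
instance (element : Int) (box : Int) (out : Int) : Decidable (Spec_count_nine element box out) := by unfold Spec_count_nine; infer_instance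

-- ===== CLAIM (what is proved, stated in full; the proofs are below) =====
def Claim_equal_count_nine : Prop := ∀ (element : Int) (box : Int), Dom_count_nine element box → Pre_count_nine element box → Spec_count_nine element box (count_nine element box)

-- ===== LEMMAS AND PROOFS =====

-- common reference count: digits least-significant first, p = "previous (lower) digit was 9"
def gcount (element : Int) : Bool → List Int → Int
  | _, [] => 0
  | p, d :: rest =>
      (if d = element ∧ p = false ∧ rest.headD 0 ≠ 9 then 1 else 0) +
        gcount element (decide (d = 9)) rest

-- fuel accounting: 10^k is an upper bound witnessing that fuel k suffices
theorem fuel_enough (box : Int) : box.toNat < 10 ^ (PySem.Int.bitLength box + 1) := by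
  have h1 := PySem.Int.lt_two_pow_bitLength box
  have h2 : 2 ^ PySem.Int.bitLength box ≤ 10 ^ PySem.Int.bitLength box :=
    Nat.pow_le_pow_left (by norm_num) _
  have h3 : 10 ^ PySem.Int.bitLength box ≤ 10 ^ (PySem.Int.bitLength box + 1) :=
    Nat.pow_le_pow_right (by norm_num) (by omega)
  omega

theorem fuel_step {box : Int} {k : Nat} (h : box.toNat < 10 ^ (k + 1)) :
    (PySem.Int.floordiv box 10).toNat < 10 ^ k := by
  rw [PySem.Int.floordiv_eq_ediv_of_pos (by omega : (0:Int) < 10)]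
  have hp : (10:Nat) ^ (k + 1) = 10 ^ k * 10 := by ring
  omega

theorem altDigitsFuel_stable :
    ∀ (k₁ : Nat), ∀ (k₂ : Nat) (box : Int), box.toNat < 10 ^ k₁ → box.toNat < 10 ^ k₂ →
      altDigitsFuel k₁ box = altDigitsFuel k₂ box := by
  intro k₁
  induction k₁ with
  | zero =>
      intro k₂ box h1 _
      have hb : ¬ box > 0 := by simp at h1; omega
      cases k₂ <;> simp [altDigitsFuel, hb]
  | succ k ih =>
      intro k₂ box h1 h2
      by_cases hb : box > 0
      · cases k₂ with
        | zero => simp at h2; omega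
        | succ k' =>
            simp only [altDigitsFuel, hb, if_true]
            rw [ih k' (PySem.Int.floordiv box 10) (fuel_step h1) (fuel_step h2)]
      · cases k₂ <;> simp [altDigitsFuel, hb]

theorem altDigits_unfold (box : Int) :
    altDigits box = if box > 0 then
      PySem.Int.mod box 10 :: altDigits (PySem.Int.floordiv box 10) else [] := by
  unfold altDigits
  by_cases hb : box > 0
  · have hstep : altDigitsFuel (PySem.Int.bitLength box + 1) box
        = PySem.Int.mod box 10 ::
            altDigitsFuel (PySem.Int.bitLength box) (PySem.Int.floordiv box 10) := by
      simp only [altDigitsFuel, hb, if_true]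
    rw [hstep, if_pos hb, altDigitsFuel_stable (PySem.Int.bitLength box)
      (PySem.Int.bitLength (PySem.Int.floordiv box 10) + 1) (PySem.Int.floordiv box 10)
      (fuel_step (fuel_enough box)) (fuel_enough _)]
  · simp [altDigitsFuel, hb]

theorem headD_altDigits (box : Int) (hb : 0 ≤ box) :
    (altDigits box).headD 0 = PySem.Int.mod box 10 := by
  rw [altDigits_unfold]
  by_cases h : box > 0
  · simp [h]
  · have hbox : box = 0 := by omega
    subst hbox
    rw [PySem.Int.mod_eq_emod_of_pos (by omega : (0:Int) < 10)]
    simp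

theorem lookahead_eq (box : Int) :
    PySem.Int.floordiv (PySem.Int.mod box 100) 10 = PySem.Int.mod (PySem.Int.floordiv box 10) 10 := by
  rw [PySem.Int.floordiv_eq_ediv_of_pos (by omega : (0:Int) < 10),
      PySem.Int.floordiv_eq_ediv_of_pos (by omega : (0:Int) < 10),
      PySem.Int.mod_eq_emod_of_pos (by omega : (0:Int) < 100),
      PySem.Int.mod_eq_emod_of_pos (by omega : (0:Int) < 10)]
  omega

theorem loopA_eq (element : Int) :
    ∀ (k : Nat) (box : Int), box.toNat < 10 ^ k → ∀ (nine : Bool) (total : Int),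
      count_nine_loop element k box nine total = total + gcount element nine (altDigits box) := by
  intro k
  induction k with
  | zero =>
      intro box hk nine total
      have h : ¬ box > 0 := by simp at hk; omega
      rw [altDigits_unfold]
      simp [count_nine_loop, h, gcount]
  | succ k ih =>
      intro box hk nine total
      by_cases h : box > 0
      · have hdiv : PySem.Int.floordiv box 10 = box / 10 :=
          PySem.Int.floordiv_eq_ediv_of_pos (by omega : (0:Int) < 10)
        have hk' : (PySem.Int.floordiv box 10).toNat < 10 ^ k := fuel_step hk
        simp only [count_nine_loop, if_pos h]
        rw [ih _ hk']
        conv_rhs => rw [altDigits_unfold]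
        simp only [h, if_true, gcount]
        have hhead : (altDigits (PySem.Int.floordiv box 10)).headD 0
            = PySem.Int.mod (PySem.Int.floordiv box 10) 10 :=
          headD_altDigits _ (by rw [hdiv]; omega)
        have hcond : (PySem.Int.mod box 10 = element ∧
            ¬(nine = true ∨ PySem.Int.floordiv (PySem.Int.mod box 100) 10 = 9)) ↔
            (PySem.Int.mod box 10 = element ∧ nine = false ∧
              (altDigits (PySem.Int.floordiv box 10)).headD 0 ≠ 9) := by
          rw [hhead, lookahead_eq box]
          constructor
          · rintro ⟨h1, h2⟩
            rw [not_or] at h2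
            exact ⟨h1, by cases nine <;> simp_all, h2.2⟩
          · rintro ⟨h1, h2, h3⟩
            refine ⟨h1, fun hor => ?_⟩
            rcases hor with h' | h'
            · rw [h2] at h'; exact Bool.false_ne_true h'
            · exact h3 h'
        by_cases hc : PySem.Int.mod box 10 = element ∧
            ¬(nine = true ∨ PySem.Int.floordiv (PySem.Int.mod box 100) 10 = 9)
        · rw [if_pos hc, if_pos (hcond.mp hc)]; ring
        · rw [if_neg hc, if_neg (fun hq => hc (hcond.mpr hq))]; ring
      · rw [altDigits_unfold]
        simp [count_nine_loop, h, gcount]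

-- a foldl counting loop over range n is the 0/1 sum over Finset.range n
theorem foldl_count_range (c : Nat → Prop) [DecidablePred c] :
    ∀ (n : Nat) (t0 : Int),
      (List.range n).foldl (fun t i => if c i then t + 1 else t) t0
        = t0 + ∑ i ∈ Finset.range n, (if c i then (1:Int) else 0) := by
  intro n
  induction n with
  | zero => simp
  | succ n ih =>
      intro t0
      rw [List.range_succ, List.foldl_append, ih, Finset.sum_range_succ]
      simp only [List.foldl]
      split_ifs <;> ring

-- the index-based 0/1 sum over a digit list equals gcount, generalizing the i = 0 left check to p
theorem sum_eq_gcount (element : Int) :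
    ∀ (l : List Int) (p : Bool),
      (∑ i ∈ Finset.range l.length,
        (if l.getD i 0 = element ∧
            (if i = 0 then p = false else l.getD (i - 1) 0 ≠ 9) ∧
            (i + 1 = l.length ∨ l.getD (i + 1) 0 ≠ 9)
         then (1:Int) else 0))
        = gcount element p l := by
  intro l
  induction l with
  | nil => simp [gcount]
  | cons d rest ih =>
      intro p
      rw [List.length_cons, Finset.sum_range_succ']
      have hshift : ∀ i ∈ Finset.range rest.length,
          (if (d :: rest).getD (i + 1) 0 = element ∧
              (if i + 1 = 0 then p = false else (d :: rest).getD (i + 1 - 1) 0 ≠ 9) ∧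
              (i + 1 + 1 = rest.length + 1 ∨ (d :: rest).getD (i + 1 + 1) 0 ≠ 9)
           then (1:Int) else 0)
          = (if rest.getD i 0 = element ∧
              (if i = 0 then (decide (d = 9)) = false else rest.getD (i - 1) 0 ≠ 9) ∧
              (i + 1 = rest.length ∨ rest.getD (i + 1) 0 ≠ 9)
             then (1:Int) else 0) := by
        intro i _
        rcases i with _ | j
        · simp [eq_comm]
        · simp
      rw [Finset.sum_congr rfl hshift, ih]
      have hhead : ((if 0 = 0 then p = false else (d :: rest).getD (0 - 1) 0 ≠ 9) ∧
          ((0:Nat) + 1 = rest.length + 1 ∨ (d :: rest).getD (0 + 1) 0 ≠ 9)) ↔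
          (p = false ∧ rest.headD 0 ≠ 9) := by
        cases rest with
        | nil => simp
        | cons x xs => simp
      rw [gcount]
      by_cases hd : d = element ∧ p = false ∧ rest.headD 0 ≠ 9
      · rw [if_pos hd, if_pos ⟨hd.1, hhead.mpr ⟨hd.2.1, hd.2.2⟩⟩]; ring
      · rw [if_neg hd, if_neg (by
          rintro ⟨h1, h2⟩
          exact hd ⟨by simpa using h1, (hhead.mp h2).1, (hhead.mp h2).2⟩)]
        ring

theorem alt_eq_gcount (element box : Int) :
    count_nine_alt element box = gcount element false (altDigits box) := by
  unfold count_nine_alt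
  rw [foldl_count_range, ← sum_eq_gcount element (altDigits box) false]
  rw [zero_add]
  apply Finset.sum_congr rfl
  intro i hi
  have hiff : ((altDigits box).getD i 0 = element ∧
      (i = 0 ∨ (altDigits box).getD (i - 1) 0 ≠ 9) ∧
      (i + 1 = (altDigits box).length ∨ (altDigits box).getD (i + 1) 0 ≠ 9)) ↔
      ((altDigits box).getD i 0 = element ∧
      (if i = 0 then (false : Bool) = false else (altDigits box).getD (i - 1) 0 ≠ 9) ∧
      (i + 1 = (altDigits box).length ∨ (altDigits box).getD (i + 1) 0 ≠ 9)) := by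
    by_cases h0 : i = 0 <;> simp [h0]
  by_cases hc : (altDigits box).getD i 0 = element ∧
      (i = 0 ∨ (altDigits box).getD (i - 1) 0 ≠ 9) ∧
      (i + 1 = (altDigits box).length ∨ (altDigits box).getD (i + 1) 0 ≠ 9)
  · rw [if_pos hc, if_pos (hiff.mp hc)]
  · rw [if_neg hc, if_neg (fun hq => hc (hiff.mpr hq))]

-- ===== VERDICT (by name: the statement is the Claim_ definition above) =====
theorem count_nine_spec : Claim_equal_count_nine := by
  intro element box _ _
  unfold Spec_count_nine count_nine
  rw [loopA_eq element (PySem.Int.bitLength box + 1) box (fuel_enough box) false 0, alt_eq_gcount, zero_add]
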